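-- pv_equiv track=rewrite | github.com/jihye0420/TIL_Algorithm | Programmers/Lv.0/용알이.py | solution
-- ===== SOURCE A (Python) =====
-- from itertools import permutations
--
-- def solution(babbling):
--     answer = 0
--     possible_lang = ['aya', 'ye', 'woo', 'ma']
--     temp_lang = []
--     for i in range(1, len(possible_lang)+1):
--         for j in permutations(possible_lang, i):
--             temp_lang.append(''.join(j))
--
--     for i in babbling:
--         if i in temp_lang:
--             answer+=1
--
--     return answer
-- ===== SOURCE B (Python) =====
-- # B: left-to-right greedy parse per string (first letters of the four words are
-- # distinct, so the next word is forced); no permutation table is built.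
-- def solution(babbling):
--     def consumable(s):
--         t = s
--         avail = ['aya', 'ye', 'woo', 'ma']
--         used = False
--         while t:
--             for w in avail:
--                 if t.startswith(w):
--                     avail.remove(w)
--                     t = t[len(w):]
--                     used = True
--                     break
--             else:
--                 return False
--         return used
--
--     count = 0
--     for s in babbling:
--         if consumable(s):
--             count += 1
--     return count
-- ===== Notes on version B (the rewrite author's own statement) =====
-- stated objective: alternative
-- what changed: B drops A's precomputed table of all 64 joined word-permutations and instead greedily parses each babbling string left-to-right, matching the unique not-yet-used word that prefixes the remainder (the four words start with distinct letters, so the parse is deterministic).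
import Mathlib
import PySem

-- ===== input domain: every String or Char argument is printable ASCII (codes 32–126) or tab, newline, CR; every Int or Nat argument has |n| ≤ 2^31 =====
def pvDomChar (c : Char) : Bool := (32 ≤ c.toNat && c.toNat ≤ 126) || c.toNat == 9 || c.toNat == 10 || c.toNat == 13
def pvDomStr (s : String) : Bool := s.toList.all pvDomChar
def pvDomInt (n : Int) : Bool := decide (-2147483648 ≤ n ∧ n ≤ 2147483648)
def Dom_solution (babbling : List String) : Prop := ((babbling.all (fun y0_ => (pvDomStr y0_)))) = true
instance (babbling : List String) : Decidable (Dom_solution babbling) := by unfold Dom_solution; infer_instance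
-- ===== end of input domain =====

-- B replaces A's precomputed table of all word-permutation joins by a greedy
-- left-to-right parse of each string (alternative decomposition, same result).


-- ===== PORT A =====
-- possible_lang = ['aya', 'ye', 'woo', 'ma']
def possibleLang : List String := ["aya", "ye", "woo", "ma"]

-- temp_lang built by the double loop:
-- for i in range(1, len(possible_lang)+1): for j in permutations(possible_lang, i): temp_lang.append(''.join(j))
def tempLang : List String :=
  (PySem.List.pyRange 1 ((possibleLang.length : Int) + 1) 1).foldl
    (fun acc i =>
      (PySem.List.permutations possibleLang i.toNat).foldl
        (fun acc2 j => acc2 ++ [PySem.Str.join "" j]) acc)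
    []

def solution (babbling : List String) : Int :=
  babbling.foldl (fun answer i => if i ∈ tempLang then answer + 1 else answer) 0

-- ===== PORT B =====
-- the while-loop of consumable(s): t is the unconsumed suffix (as List Char),
-- avail the not-yet-used words, used whether any word was matched so far.
-- fuel is only a structural-termination device: it starts at avail.length and
-- each step removes one word from avail, so the `some _, 0` branch is never hit.
def goBFuel (fuel : Nat) (t : List Char) (avail : List String) (used : Bool) : Bool :=
  if t = [] then used
  else
    match avail.find? (fun w => PySem.Chars.startswith t w.toList), fuel with
    | none, _ => false
    | some _, 0 => false
    | some w, n + 1 => goBFuel n (t.drop w.toList.length) (avail.erase w) true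

def goB (t : List Char) (avail : List String) (used : Bool) : Bool :=
  goBFuel avail.length t avail used

def solution_alt (babbling : List String) : Int :=
  babbling.foldl
    (fun count s => if goB s.toList ["aya", "ye", "woo", "ma"] false then count + 1 else count) 0

-- ===== PRECONDITION & SPEC =====
def Spec_solution (babbling : List String) (out : Int) : Prop := out = solution_alt babbling
instance (babbling : List String) (out : Int) : Decidable (Spec_solution babbling out) := by unfold Spec_solution; infer_instance

-- ===== CLAIM (what is proved, stated in full; the proofs are below) =====
def Claim_equal_solution : Prop := ∀ (babbling : List String), Dom_solution babbling → Spec_solution babbling (solution babbling)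

-- ===== LEMMAS AND PROOFS =====

-- forward direction: every table entry is accepted by the greedy parse (finite check)
theorem fwd : ∀ s ∈ tempLang, goB s.toList ["aya", "ye", "woo", "ma"] false = true := by
  decide

-- a nodup selection from a nodup list occurs among its permutations of that length
theorem mem_perms : ∀ (ws xs : List String), xs.Nodup → ws.Nodup → ws ⊆ xs →
    ws ∈ PySem.List.permutations xs ws.length := by
  intro ws
  induction ws with
  | nil => intro xs _ _ _; simp
  | cons w t ih =>
    intro xs hxs hwt hsub
    have hw : w ∈ xs := hsub (List.mem_cons_self ..)
    have hnotw : w ∉ t := (List.nodup_cons.mp hwt).1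
    have ht : t.Nodup := (List.nodup_cons.mp hwt).2
    have htsub : t ⊆ xs.erase w := by
      intro x hx
      exact (List.mem_erase_of_ne (by rintro rfl; exact hnotw hx)).mpr
        (hsub (List.mem_cons_of_mem _ hx))
    have hrec := ih (xs.erase w) (hxs.erase w) ht htsub
    show w :: t ∈ PySem.List.permutations xs (t.length + 1)
    rw [PySem.List.permutations]
    apply List.mem_flatMap.mpr
    refine ⟨xs.idxOf w, List.mem_range.mpr (List.idxOf_lt_length_of_mem hw), ?_⟩
    rw [List.getElem?_idxOf hw]
    rw [← List.erase_eq_eraseIdx_of_idxOf rfl]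
    exact List.mem_map.mpr ⟨t, hrec, rfl⟩

-- join with the empty separator is flatten
theorem join_empty (css : List (List Char)) : PySem.Chars.join [] css = css.flatten := by
  induction css with
  | nil => simp [PySem.Chars.join_nil]
  | cons a rest ih =>
    cases rest with
    | nil => simp [PySem.Chars.join_singleton]
    | cons b r => simp [PySem.Chars.join_cons_cons] at *; simp [ih]

-- tempLang contains the join of every permutation of 1..4 of the words
theorem mem_tempLang_of_perm (n : Nat) (h1 : 1 ≤ n) (h4 : n ≤ 4)
    (ws : List String) (hws : ws ∈ PySem.List.permutations possibleLang n) :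
    PySem.Str.join "" ws ∈ tempLang := by
  interval_cases n <;> revert hws <;> revert ws <;> decide

-- soundness of the greedy parse: an accepted string is a join of distinct available words
theorem goB_sound : ∀ (fuel : Nat) (t : List Char) (avail : List String) (m : Bool),
    avail.Nodup → goBFuel fuel t avail m = true →
    ∃ ws : List String, ws.Nodup ∧ ws ⊆ avail ∧ (ws.map String.toList).flatten = t ∧
      (ws = [] → m = true) := by
  intro fuel
  induction fuel with
  | zero =>
    intro t avail m _ hg
    unfold goBFuel at hg
    by_cases ht : t = []
    · exact ⟨[], by simp, by simp, by simp [ht], fun _ => by simpa [ht] using hg⟩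
    · rw [if_neg ht] at hg
      split at hg <;> simp_all
  | succ n ihf =>
    intro t avail m hnd hg
    unfold goBFuel at hg
    by_cases ht : t = []
    · exact ⟨[], by simp, by simp, by simp [ht], fun _ => by simpa [ht] using hg⟩
    · rw [if_neg ht] at hg
      split at hg
      case _ => simp at hg
      case _ => simp at hg
      case _ w n' hfind heq =>
        have hw : w ∈ avail := List.mem_of_find?_eq_some hfind
        have hpre : w.toList <+: t := by
          have := List.find?_some hfind
          exact (PySem.Chars.startswith_iff t w.toList).mp (by simpa using this)
        obtain rfl : n = n' := Nat.succ_inj.mp heq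
        obtain ⟨ws, hnd', hsub', hfl, _⟩ := ihf _ _ _ (hnd.erase w) hg
        refine ⟨w :: ws, ?_, ?_, ?_, by simp⟩
        · exact List.nodup_cons.mpr ⟨fun hmem => hnd.not_mem_erase (hsub' hmem), hnd'⟩
        · intro x hx
          rcases List.mem_cons.mp hx with h1 | h1
          · exact h1 ▸ hw
          · exact List.erase_subset (hsub' h1)
        · simp only [List.map_cons, List.flatten_cons, hfl]
          exact List.prefix_iff_eq_append.mp hpre

-- per-string agreement of the two membership tests
theorem key (s : String) :
    (s ∈ tempLang) ↔ goB s.toList ["aya", "ye", "woo", "ma"] false = true := by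
  constructor
  · exact fun h => fwd s h
  · intro h
    obtain ⟨ws, hnd, hsub, hfl, hne⟩ := goB_sound _ _ _ _ (by decide) h
    have hlen4 : ws.length ≤ 4 := by
      have := (List.subperm_of_subset hnd hsub).length_le
      simpa using this
    have hne' : ws ≠ [] := by
      intro he; rw [he] at hne; simp at hne
    have hlen1 : 1 ≤ ws.length := List.length_pos_of_ne_nil hne'
    have hmem := mem_perms ws possibleLang (by decide) hnd hsub
    have hj : PySem.Str.join "" ws = s := by
      apply String.toList_inj.mp
      rw [PySem.Str.toList_join]
      simpa [join_empty] using hfl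
    exact hj ▸ mem_tempLang_of_perm ws.length hlen1 hlen4 ws hmem

-- the two counting folds agree for every accumulator
theorem fold_eq : ∀ (l : List String) (acc : Int),
    l.foldl (fun answer i => if i ∈ tempLang then answer + 1 else answer) acc =
    l.foldl (fun count s =>
      if goB s.toList ["aya", "ye", "woo", "ma"] false then count + 1 else count) acc := by
  intro l
  induction l with
  | nil => intro acc; rfl
  | cons s rest ih =>
    intro acc
    simp only [List.foldl_cons]
    rw [show (if s ∈ tempLang then acc + 1 else acc) =
        (if goB s.toList ["aya", "ye", "woo", "ma"] false then acc + 1 else acc) from by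
      by_cases hc : s ∈ tempLang
      · rw [if_pos hc, if_pos ((key s).mp hc)]
      · rw [if_neg hc, if_neg (fun hb => hc ((key s).mpr hb))]]
    exact ih _

-- ===== VERDICT (by name: the statement is the Claim_ definition above) =====
theorem solution_spec : Claim_equal_solution := by
  intro babbling _
  unfold Spec_solution solution solution_alt
  exact fold_eq babbling 0
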